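-- pv_equiv track=rewrite | github.com/samay2504/AttentionGANs | token_pad.py | custom_tokenizer
-- ===== SOURCE A (Python) =====
-- def custom_tokenizer(texts):
--     vocab = {}
--     sequences = []
--     for text in texts:
--         sequence = []
--         for word in text.lower().split():
--             if word not in vocab:
--                 vocab[word] = len(vocab) + 1
--             sequence.append(vocab[word])
--         sequences.append(sequence)
--     return sequences, vocab
-- ===== SOURCE B (Python) =====
-- def custom_tokenizer(texts):
--     vocab = {}
--     for text in texts:
--         for word in text.lower().split():
--             if word not in vocab:
--                 vocab[word] = len(vocab) + 1
--     sequences = [[vocab[word] for word in text.lower().split()] for text in texts]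
--     return sequences, vocab
-- ===== Notes on version B (the rewrite author's own statement) =====
-- stated objective: alternative
-- what changed: B builds the complete vocabulary in a first pass and then produces every sequence by pure lookups in a second comprehension pass, instead of A's single loop that interleaves vocabulary growth with sequence construction.
import Mathlib
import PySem

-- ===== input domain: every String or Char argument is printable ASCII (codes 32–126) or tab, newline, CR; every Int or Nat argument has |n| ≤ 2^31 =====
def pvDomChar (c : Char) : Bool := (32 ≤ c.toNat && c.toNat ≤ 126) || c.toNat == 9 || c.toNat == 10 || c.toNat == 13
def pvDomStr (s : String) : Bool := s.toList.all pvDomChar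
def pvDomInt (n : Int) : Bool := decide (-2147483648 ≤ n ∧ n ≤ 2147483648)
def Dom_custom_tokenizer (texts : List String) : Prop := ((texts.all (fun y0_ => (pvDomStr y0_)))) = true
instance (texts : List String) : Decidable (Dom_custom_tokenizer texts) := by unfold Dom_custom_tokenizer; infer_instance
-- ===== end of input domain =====

-- B interleaves nothing: it builds the full vocabulary in a first pass, then maps every text
-- through pure lookups in a second pass; same return value as A (alternative decomposition).

-- text.lower().split()
def pvWords (t : String) : List String := PySem.Str.split₀ (PySem.Str.lower t)

-- ===== PORT A =====
-- single loop: vocabulary growth interleaved with sequence construction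
-- (vocab.getD word 0: the key is always present at that point, so the default is never used)
def custom_tokenizer (texts : List String) : List (List Int) × (List (String × Int)) :=
  let st := texts.foldl
    (fun (st : PySem.Dict String Int × List (List Int)) text =>
      let inner := (pvWords text).foldl
        (fun (st2 : PySem.Dict String Int × List Int) word =>
          let v := if st2.1.contains word then st2.1
                   else st2.1.insert word ((st2.1.size : Int) + 1)
          (v, st2.2 ++ [v.getD word 0]))
        (st.1, [])
      (inner.1, st.2 ++ [inner.2]))
    (PySem.Dict.empty, [])
  (st.2, st.1.items)

-- ===== PORT B =====
-- pass 1 step: add one word to the vocabulary if unseen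
def pvAddW (v : PySem.Dict String Int) (w : String) : PySem.Dict String Int :=
  if v.contains w then v else v.insert w ((v.size : Int) + 1)

def custom_tokenizer_alt (texts : List String) : List (List Int) × (List (String × Int)) :=
  let vocab := texts.foldl (fun v text => (pvWords text).foldl pvAddW v) PySem.Dict.empty
  (texts.map (fun text => (pvWords text).map (fun w => vocab.getD w 0)), vocab.items)

-- ===== PRECONDITION & SPEC =====
def Spec_custom_tokenizer (texts : List String) (out : List (List Int) × (List (String × Int))) : Prop := out = custom_tokenizer_alt texts
instance (texts : List String) (out : List (List Int) × (List (String × Int))) : Decidable (Spec_custom_tokenizer texts out) := by unfold Spec_custom_tokenizer; infer_instance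

-- ===== CLAIM (what is proved, stated in full; the proofs are below) =====
def Claim_equal_custom_tokenizer : Prop := ∀ (texts : List String), Dom_custom_tokenizer texts → Spec_custom_tokenizer texts (custom_tokenizer texts)

-- ===== LEMMAS AND PROOFS =====

-- "every binding of v survives in v'" (vocabulary only grows, ids never change)
def pvExt (v v' : PySem.Dict String Int) : Prop :=
  ∀ w i, v.get? w = some i → v'.get? w = some i

theorem pvExt_refl (v : PySem.Dict String Int) : pvExt v v := fun _ _ h => h

theorem pvExt_trans {a b c : PySem.Dict String Int} (h1 : pvExt a b) (h2 : pvExt b c) :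
    pvExt a c := fun w i h => h2 w i (h1 w i h)

theorem pvExt_addW (v : PySem.Dict String Int) (w : String) : pvExt v (pvAddW v w) := by
  intro x i h
  unfold pvAddW
  split
  · exact h
  · rename_i hc
    rw [PySem.Dict.get?_insert]
    split
    · rename_i hx; subst hx
      rw [PySem.Dict.contains_eq_isSome_get?, h] at hc
      simp at hc
    · exact h

theorem pvExt_foldW (ws : List String) (v : PySem.Dict String Int) :
    pvExt v (ws.foldl pvAddW v) := by
  induction ws generalizing v with
  | nil => exact pvExt_refl v
  | cons w ws ih =>
      exact pvExt_trans (pvExt_addW v w) (by simpa using ih (pvAddW v w))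

theorem pvExt_foldT (ts : List String) (v : PySem.Dict String Int) :
    pvExt v (ts.foldl (fun v t => (pvWords t).foldl pvAddW v) v) := by
  induction ts generalizing v with
  | nil => exact pvExt_refl v
  | cons t ts ih =>
      exact pvExt_trans (pvExt_foldW (pvWords t) v)
        (by simpa using ih ((pvWords t).foldl pvAddW v))

theorem get?_addW_self (v : PySem.Dict String Int) (w : String) :
    ∃ i, (pvAddW v w).get? w = some i := by
  unfold pvAddW
  split
  · rename_i hc
    rw [PySem.Dict.contains_eq_isSome_get?] at hc
    exact Option.isSome_iff_exists.mp hc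
  · exact ⟨_, PySem.Dict.get?_insert_self _ _ _⟩

-- A's inner sequence values, expressed with the vocab at each step
def pvSeqOf (v : PySem.Dict String Int) : List String → List Int
  | [] => []
  | w :: ws => (pvAddW v w).getD w 0 :: pvSeqOf (pvAddW v w) ws

def pvSeqsOf (v : PySem.Dict String Int) : List String → List (List Int)
  | [] => []
  | t :: ts => pvSeqOf v (pvWords t) :: pvSeqsOf ((pvWords t).foldl pvAddW v) ts

theorem innerA_eq (ws : List String) (v : PySem.Dict String Int) (acc : List Int) :
    ws.foldl
      (fun (st2 : PySem.Dict String Int × List Int) word =>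
        let v := if st2.1.contains word then st2.1
                 else st2.1.insert word ((st2.1.size : Int) + 1)
        (v, st2.2 ++ [v.getD word 0])) (v, acc)
    = (ws.foldl pvAddW v, acc ++ pvSeqOf v ws) := by
  induction ws generalizing v acc with
  | nil => simp [pvSeqOf]
  | cons w ws ih =>
      simp only [List.foldl_cons, pvSeqOf]
      rw [show (if v.contains w then v else v.insert w ((v.size : Int) + 1)) = pvAddW v w from rfl]
      rw [ih]
      simp

theorem outerA_eq (ts : List String) (v : PySem.Dict String Int) (acc : List (List Int)) :
    ts.foldl
      (fun (st : PySem.Dict String Int × List (List Int)) text =>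
        let inner := (pvWords text).foldl
          (fun (st2 : PySem.Dict String Int × List Int) word =>
            let v := if st2.1.contains word then st2.1
                     else st2.1.insert word ((st2.1.size : Int) + 1)
            (v, st2.2 ++ [v.getD word 0]))
          (st.1, [])
        (inner.1, st.2 ++ [inner.2])) (v, acc)
    = (ts.foldl (fun v t => (pvWords t).foldl pvAddW v) v, acc ++ pvSeqsOf v ts) := by
  induction ts generalizing v acc with
  | nil => simp [pvSeqsOf]
  | cons t ts ih =>
      simp only [List.foldl_cons, pvSeqsOf]
      rw [innerA_eq]
      rw [ih]
      simp

theorem pvSeqOf_eq_map (ws : List String) (v vf : PySem.Dict String Int)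
    (h : pvExt (ws.foldl pvAddW v) vf) :
    pvSeqOf v ws = ws.map (fun w => vf.getD w 0) := by
  induction ws generalizing v with
  | nil => rfl
  | cons w ws ih =>
      have hstep : pvExt (pvAddW v w) vf :=
        pvExt_trans (pvExt_foldW ws (pvAddW v w)) (by simpa using h)
      obtain ⟨i, hi⟩ := get?_addW_self v w
      simp only [pvSeqOf, List.map_cons]
      congr 1
      · rw [PySem.Dict.getD_eq_get?_getD, hi, PySem.Dict.getD_eq_get?_getD, hstep w i hi]
      · exact ih (pvAddW v w) (by simpa using h)

theorem pvSeqsOf_eq_map (ts : List String) (v vf : PySem.Dict String Int)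
    (h : pvExt (ts.foldl (fun v t => (pvWords t).foldl pvAddW v) v) vf) :
    pvSeqsOf v ts = ts.map (fun t => (pvWords t).map (fun w => vf.getD w 0)) := by
  induction ts generalizing v with
  | nil => rfl
  | cons t ts ih =>
      simp only [pvSeqsOf, List.map_cons]
      congr 1
      · apply pvSeqOf_eq_map
        exact pvExt_trans (pvExt_foldT ts ((pvWords t).foldl pvAddW v)) (by simpa using h)
      · exact ih ((pvWords t).foldl pvAddW v) (by simpa using h)

-- ===== VERDICT (by name: the statement is the Claim_ definition above) =====
theorem custom_tokenizer_spec : Claim_equal_custom_tokenizer := by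
  intro texts _
  unfold Spec_custom_tokenizer custom_tokenizer custom_tokenizer_alt
  rw [outerA_eq]
  simp only [List.nil_append]
  rw [pvSeqsOf_eq_map texts PySem.Dict.empty _ (pvExt_refl _)]
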